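-- pv_equiv track=rewrite | github.com/yanghao13111/YC_QuantitativeTrading | combined_strategy.py | generate_expressions
-- ===== SOURCE A (Python) =====
-- from itertools import combinations, product
--
-- def generate_expressions(conditions):
--     expressions = []
--
--     # 针对不同长度的组合生成表达式
--     for r in range(1, len(conditions) + 1):
--         for subset in combinations(conditions, r):
--             # 对于每个子集，生成所有可能的 AND/OR 组合
--             operators = list(product([' and ', ' or '], repeat=r-1))
--             for operator in operators:
--                 expr = ''
--                 for i, cond in enumerate(subset):
--                     expr += cond
--                     if i < len(operator):
--                         expr += operator[i]
--                 expressions.append(expr)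
--
--     return expressions
-- ===== SOURCE B (Python) =====
-- from itertools import combinations
--
-- def generate_expressions(conditions):
--     expressions = []
--     for r in range(1, len(conditions) + 1):
--         for subset in combinations(conditions, r):
--             exprs = [subset[0]]
--             for cond in subset[1:]:
--                 exprs = [e + op + cond for e in exprs for op in (' and ', ' or ')]
--             expressions.extend(exprs)
--     return expressions
-- ===== Notes on version B (the rewrite author's own statement) =====
-- stated objective: alternative
-- what changed: The inner product(ops, repeat=r-1) enumeration plus index-interleaved string assembly is replaced by iterative expansion of a list of partial expressions (exprs = [e + op + cond ...]), preserving the exact output order.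
import Mathlib
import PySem

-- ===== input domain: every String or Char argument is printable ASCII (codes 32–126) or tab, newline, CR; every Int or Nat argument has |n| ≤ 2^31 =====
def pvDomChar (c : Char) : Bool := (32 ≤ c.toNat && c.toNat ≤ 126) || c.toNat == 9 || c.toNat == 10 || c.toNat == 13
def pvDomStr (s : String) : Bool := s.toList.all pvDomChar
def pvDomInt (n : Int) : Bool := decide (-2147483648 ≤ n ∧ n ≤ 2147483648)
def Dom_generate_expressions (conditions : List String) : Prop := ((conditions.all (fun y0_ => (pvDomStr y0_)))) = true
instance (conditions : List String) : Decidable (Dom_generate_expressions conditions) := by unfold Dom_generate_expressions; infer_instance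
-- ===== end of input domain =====

-- B replaces A's operator-tuple enumeration (itertools.product + indexed interleaving) by
-- iterative left-to-right expansion of partial expressions; objective: alternative decomposition, same output.

-- ===== PORT A =====
-- itertools.combinations(l, r), in Python's emission order
def pvComb : Nat → List String → List (List String)
  | 0, _ => [[]]
  | _ + 1, [] => []
  | r + 1, x :: xs => (pvComb r xs).map (fun s => x :: s) ++ pvComb (r + 1) xs

-- itertools.product([' and ', ' or '], repeat=n), in Python's emission order (first slot slowest)
def pvProdRep : Nat → List (List String)
  | 0 => [[]]
  | n + 1 => [" and ", " or "].flatMap (fun o => (pvProdRep n).map (fun os => o :: os))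

-- the inner "for i, cond in enumerate(subset)" loop of A
def pvBuildStep (operator : List String) (expr : String) (p : String × Nat) : String :=
  let expr := expr ++ p.1
  if p.2 < operator.length then expr ++ operator.getD p.2 "" else expr

def pvBuild (operator : List String) (subset : List String) : String :=
  (subset.zipIdx).foldl (pvBuildStep operator) ""

def generate_expressions (conditions : List String) : List String :=
  (List.range' 1 conditions.length).foldl (fun expressions r =>
    (pvComb r conditions).foldl (fun expressions subset =>
      let operators := pvProdRep (r - 1)
      operators.foldl (fun expressions operator =>
        expressions ++ [pvBuild operator subset]) expressions) expressions) []

-- ===== PORT B =====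
-- one expansion step: exprs = [e + op + cond for e in exprs for op in (' and ', ' or ')]
def pvStep (exprs : List String) (cond : String) : List String :=
  exprs.flatMap (fun e => [" and ", " or "].map (fun op => e ++ op ++ cond))

-- exprs = [subset[0]]; for cond in subset[1:]: exprs = step exprs cond
def pvExpand (subset : List String) : List String :=
  match subset with
  | [] => []
  | c :: rest => rest.foldl pvStep [c]

def generate_expressions_alt (conditions : List String) : List String :=
  (List.range' 1 conditions.length).foldl (fun expressions r =>
    (pvComb r conditions).foldl (fun expressions subset =>
      expressions ++ pvExpand subset) expressions) []

-- ===== PRECONDITION & SPEC =====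
def Spec_generate_expressions (conditions : List String) (out : List String) : Prop := out = generate_expressions_alt conditions
instance (conditions : List String) (out : List String) : Decidable (Spec_generate_expressions conditions out) := by unfold Spec_generate_expressions; infer_instance

-- ===== CLAIM (what is proved, stated in full; the proofs are below) =====
def Claim_equal_generate_expressions : Prop := ∀ (conditions : List String), Dom_generate_expressions conditions → Spec_generate_expressions conditions (generate_expressions conditions)

-- ===== LEMMAS AND PROOFS =====

-- every member of pvComb r l has length r
theorem pvComb_length : ∀ (l : List String) (r : Nat) (s : List String),
    s ∈ pvComb r l → s.length = r := by
  intro l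
  induction l with
  | nil =>
    intro r s h
    cases r with
    | zero => simp [pvComb] at h; simp [h]
    | succ r => simp [pvComb] at h
  | cons x xs ih =>
    intro r s h
    cases r with
    | zero => simp [pvComb] at h; simp [h]
    | succ r =>
      simp [pvComb] at h
      rcases h with ⟨t, ht, rfl⟩ | h
      · simp [ih r t ht]
      · exact ih (r + 1) s h

-- pull the accumulator out of A's inner fold
theorem pvBuild_acc (ops : List String) : ∀ (l : List (String × Nat)) (acc : String),
    l.foldl (pvBuildStep ops) acc = acc ++ l.foldl (pvBuildStep ops) "" := by
  intro l
  induction l with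
  | nil => intro acc; simp
  | cons p t ih =>
    intro acc
    have hstep : pvBuildStep ops acc p = acc ++ pvBuildStep ops "" p := by
      simp only [pvBuildStep]
      split <;> simp [String.append_assoc]
    simp only [List.foldl_cons]
    rw [ih (pvBuildStep ops acc p), ih (pvBuildStep ops "" p), hstep, String.append_assoc]

-- shifting the enumerate offset by one matches dropping the first operator
theorem pvBuild_shift (o : String) (os : List String) : ∀ (t : List String) (k : Nat) (acc : String),
    (t.zipIdx (k + 1)).foldl (pvBuildStep (o :: os)) acc
      = (t.zipIdx k).foldl (pvBuildStep os) acc := by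
  intro t
  induction t with
  | nil => intro k acc; simp
  | cons c t ih =>
    intro k acc
    simp only [List.zipIdx_cons, List.foldl_cons]
    rw [ih (k + 1)]
    congr 1
    simp only [pvBuildStep, List.length_cons, List.getD_cons_succ]
    have : k + 1 < os.length + 1 ↔ k < os.length := by omega
    simp [this]

theorem pvBuild_cons (o : String) (os : List String) (c : String) (t : List String) :
    pvBuild (o :: os) (c :: t) = c ++ o ++ pvBuild os t := by
  simp only [pvBuild, List.zipIdx_cons, List.foldl_cons]
  rw [pvBuild_shift]
  have hfirst : pvBuildStep (o :: os) "" (c, 0) = c ++ o := by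
    simp [pvBuildStep]
  rw [hfirst, pvBuild_acc]

theorem pvBuild_single (c : String) : pvBuild [] [c] = c := by
  simp [pvBuild, pvBuildStep, List.zipIdx]

-- pvStep distributes over list append
theorem pvStep_foldl_append : ∀ (l xs ys : List String),
    l.foldl pvStep (xs ++ ys) = l.foldl pvStep xs ++ l.foldl pvStep ys := by
  intro l
  induction l with
  | nil => intro xs ys; simp
  | cons d l ih =>
    intro xs ys
    simp only [List.foldl_cons]
    rw [show pvStep (xs ++ ys) d = pvStep xs d ++ pvStep ys d by simp [pvStep], ih]

-- pvStep commutes with prepending a fixed string to every expression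
theorem pvStep_foldl_map (p : String) : ∀ (l xs : List String),
    l.foldl pvStep (xs.map (fun e => p ++ e)) = (l.foldl pvStep xs).map (fun e => p ++ e) := by
  intro l
  induction l with
  | nil => intro xs; simp
  | cons d l ih =>
    intro xs
    simp only [List.foldl_cons]
    rw [show pvStep (xs.map (fun e => p ++ e)) d = (pvStep xs d).map (fun e => p ++ e) by
      simp [pvStep, List.flatMap_map, List.map_flatMap, String.append_assoc], ih]

-- core: A's product enumeration equals B's iterative expansion, for a nonempty subset
theorem pvMap_prod_eq_expand : ∀ (rest : List String) (c : String),
    (pvProdRep rest.length).map (fun op => pvBuild op (c :: rest)) = pvExpand (c :: rest) := by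
  intro rest
  induction rest with
  | nil => intro c; simp [pvProdRep, pvExpand, pvBuild_single]
  | cons d rest ih =>
    intro c
    have lhs : (pvProdRep (d :: rest).length).map (fun op => pvBuild op (c :: d :: rest))
        = [" and ", " or "].flatMap (fun o =>
            (pvExpand (d :: rest)).map (fun e => (c ++ o) ++ e)) := by
      simp only [List.length_cons, pvProdRep, List.map_flatMap, List.map_map]
      congr 1
      funext o
      have : ((fun op => pvBuild op (c :: d :: rest)) ∘ fun os => o :: os)
          = fun os => (c ++ o) ++ pvBuild os (d :: rest) := by
        funext os
        simp [Function.comp, pvBuild_cons, String.append_assoc]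
      rw [this, show (fun os => (c ++ o) ++ pvBuild os (d :: rest))
          = (fun e => (c ++ o) ++ e) ∘ (fun os => pvBuild os (d :: rest)) from rfl,
        ← List.map_map, ih d]
    rw [lhs]
    have rhs : pvExpand (c :: d :: rest)
        = [" and ", " or "].flatMap (fun o =>
            (pvExpand (d :: rest)).map (fun e => (c ++ o) ++ e)) := by
      simp only [pvExpand, List.foldl_cons]
      have hstep : pvStep [c] d = [(c ++ " and ") ++ d] ++ [(c ++ " or ") ++ d] := by
        simp [pvStep, String.append_assoc]
      rw [hstep, pvStep_foldl_append]
      have h1 : ([(c ++ " and ") ++ d] : List String) = [d].map (fun e => (c ++ " and ") ++ e) := by simp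
      have h2 : ([(c ++ " or ") ++ d] : List String) = [d].map (fun e => (c ++ " or ") ++ e) := by simp
      rw [h1, h2, pvStep_foldl_map, pvStep_foldl_map]
      simp [List.flatMap_cons]
    rw [rhs]

-- A's append-one-at-a-time inner fold is extend by the mapped list
theorem pvFoldl_append_map (f : List String → String) : ∀ (ops : List (List String)) (es : List String),
    ops.foldl (fun es op => es ++ [f op]) es = es ++ ops.map f := by
  intro ops
  induction ops with
  | nil => intro es; simp
  | cons o t ih => intro es; simp [ih]

-- generic: replacing each subset's product fold by its expansion, pointwise
theorem pvStep_eq_gen (n : Nat) : ∀ (subs : List (List String)) (es : List String),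
    (∀ s ∈ subs, (pvProdRep n).map (fun op => pvBuild op s) = pvExpand s) →
    subs.foldl (fun expressions subset =>
        (pvProdRep n).foldl (fun expressions operator =>
          expressions ++ [pvBuild operator subset]) expressions) es
      = subs.foldl (fun expressions subset => expressions ++ pvExpand subset) es := by
  intro subs
  induction subs with
  | nil => intro es _; rfl
  | cons s t ih =>
    intro es h
    simp only [List.foldl_cons]
    rw [pvFoldl_append_map, h s (by simp),
      ih _ (fun x hx => h x (List.mem_cons_of_mem _ hx))]

-- per-r step equality
theorem pvStep_eq (conditions : List String) (r : Nat) (hr : 1 ≤ r) : ∀ (es : List String),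
    (pvComb r conditions).foldl (fun expressions subset =>
        (pvProdRep (r - 1)).foldl (fun expressions operator =>
          expressions ++ [pvBuild operator subset]) expressions) es
      = (pvComb r conditions).foldl (fun expressions subset =>
          expressions ++ pvExpand subset) es := by
  intro es
  apply pvStep_eq_gen
  intro s hs
  have hlen := pvComb_length conditions r s hs
  cases s with
  | nil => simp at hlen; omega
  | cons c rest =>
    have : rest.length = r - 1 := by simp at hlen; omega
    rw [← this, pvMap_prod_eq_expand]

-- ===== VERDICT (by name: the statement is the Claim_ definition above) =====
theorem generate_expressions_spec : Claim_equal_generate_expressions := by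
  intro conditions _
  unfold Spec_generate_expressions generate_expressions generate_expressions_alt
  have : ∀ (rs : List Nat) (es : List String), (∀ r ∈ rs, 1 ≤ r) →
      rs.foldl (fun expressions r =>
        (pvComb r conditions).foldl (fun expressions subset =>
          (pvProdRep (r - 1)).foldl (fun expressions operator =>
            expressions ++ [pvBuild operator subset]) expressions) expressions) es
      = rs.foldl (fun expressions r =>
          (pvComb r conditions).foldl (fun expressions subset =>
            expressions ++ pvExpand subset) expressions) es := by
    intro rs
    induction rs with
    | nil => intro es _; rfl
    | cons r t ih =>
      intro es h
      simp only [List.foldl_cons]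
      rw [pvStep_eq conditions r (h r (by simp)),
        ih _ (fun x hx => h x (List.mem_cons_of_mem _ hx))]
  exact this (List.range' 1 conditions.length) []
    (fun r hr => by have := List.mem_range'.mp hr; omega)
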